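-- pv_equiv track=rewrite | github.com/kwonhyeonjin00/codetree-TILs | 241002/함수를 이용한 온전수 판별/determining-the-whole-number-using-a-function.py | is_onjeonsu
-- ===== SOURCE A (Python) =====
-- def is_onjeonsu(a, b):
--     cnt = 0
--     for i in range(a, b+1):
--         if i % 2 == 0:
--             continue
--         elif i % 10 == 5:
--             continue
--         elif i % 3 == 0 and i % 9 != 0:
--             continue
--         else:
--             cnt += 1
--     return cnt
-- ===== SOURCE B (Python) =====
-- _GOOD = [r for r in range(90)
--          if not (r % 2 == 0 or r % 10 == 5 or (r % 3 == 0 and r % 9 != 0))]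
--
-- def is_onjeonsu(a, b):
--     if a > b:
--         return 0
--     return sum((b - r) // 90 - (a - 1 - r) // 90 for r in _GOOD)
-- ===== Notes on version B (the rewrite author's own statement) =====
-- stated objective: faster
-- what changed: Replaced the per-integer scan of [a,b] with an O(1) closed form: the passing residues repeat with period 90 (lcm of 2,10,9), so B sums, over the 28 good residues r mod 90, the count floor((b-r)/90) - floor((a-1-r)/90) of members of the interval congruent to r.
import Mathlib
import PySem

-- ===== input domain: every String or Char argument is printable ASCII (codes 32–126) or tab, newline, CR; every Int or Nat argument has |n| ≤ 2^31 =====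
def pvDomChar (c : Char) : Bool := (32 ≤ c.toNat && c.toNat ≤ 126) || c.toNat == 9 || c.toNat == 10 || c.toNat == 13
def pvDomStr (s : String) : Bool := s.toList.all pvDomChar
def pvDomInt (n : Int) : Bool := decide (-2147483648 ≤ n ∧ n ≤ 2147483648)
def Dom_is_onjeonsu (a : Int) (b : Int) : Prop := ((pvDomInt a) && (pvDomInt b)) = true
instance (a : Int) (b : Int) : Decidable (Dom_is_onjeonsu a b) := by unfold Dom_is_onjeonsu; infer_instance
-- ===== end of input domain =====

-- B replaces A's per-integer scan of [a,b] by a period-90 residue-class closed form (asymptotically faster).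


-- ===== PORT A =====
def is_onjeonsu (a : Int) (b : Int) : Int :=
  (PySem.List.pyRange a (b + 1) 1).foldl
    (fun cnt i =>
      if PySem.Int.mod i 2 = 0 then cnt
      else if PySem.Int.mod i 10 = 5 then cnt
      else if PySem.Int.mod i 3 = 0 ∧ PySem.Int.mod i 9 ≠ 0 then cnt
      else cnt + 1) 0

-- ===== PORT B =====
-- the module-level list comprehension _GOOD of Source B
def pvGood : List Int :=
  (PySem.List.pyRange 0 90 1).filter (fun r =>
    !(PySem.Int.mod r 2 == 0 || PySem.Int.mod r 10 == 5 ||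
      (PySem.Int.mod r 3 == 0 && PySem.Int.mod r 9 != 0)))

def is_onjeonsu_alt (a : Int) (b : Int) : Int :=
  if a > b then 0
  else (pvGood.map (fun r =>
    PySem.Int.floordiv (b - r) 90 - PySem.Int.floordiv (a - 1 - r) 90)).sum

-- ===== PRECONDITION & SPEC =====
def Spec_is_onjeonsu (a : Int) (b : Int) (out : Int) : Prop := out = is_onjeonsu_alt a b
instance (a : Int) (b : Int) (out : Int) : Decidable (Spec_is_onjeonsu a b out) := by unfold Spec_is_onjeonsu; infer_instance

-- ===== CLAIM (what is proved, stated in full; the proofs are below) =====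
def Claim_equal_is_onjeonsu : Prop := ∀ (a : Int) (b : Int), Dom_is_onjeonsu a b → Spec_is_onjeonsu a b (is_onjeonsu a b)

-- ===== LEMMAS AND PROOFS =====

-- A's per-element contribution (0 or 1), with A's branch conditions in A's order
def pvInd (i : Int) : Int :=
  if PySem.Int.mod i 2 = 0 then 0
  else if PySem.Int.mod i 10 = 5 then 0
  else if PySem.Int.mod i 3 = 0 ∧ PySem.Int.mod i 9 ≠ 0 then 0
  else 1

-- B's prefix-count function (difference form)
def pvF (n : Int) : Int :=
  (pvGood.map (fun r => PySem.Int.floordiv (n - r) 90)).sum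

theorem pv_sum_map_sub (f g : Int → Int) (l : List Int) :
    (l.map (fun r => f r - g r)).sum = (l.map f).sum - (l.map g).sum := by
  induction l with
  | nil => simp
  | cons x xs ih => simp [ih]; ring

-- the step: how much B's prefix count grows at n, as a function only of n % 90
theorem pvF_step (n : Int) : pvF n - pvF (n - 1) = pvInd n := by
  have hsplit : ∀ r : Int,
      PySem.Int.floordiv (n - r) 90 - PySem.Int.floordiv (n - 1 - r) 90 =
      PySem.Int.floordiv (n % 90 - r) 90 - PySem.Int.floordiv (n % 90 - 1 - r) 90 := by
    intro r
    simp only [PySem.Int.floordiv_eq_ediv_of_pos (show (0:Int) < 90 by norm_num)]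
    omega
  have hmods : PySem.Int.mod n 2 = PySem.Int.mod (n % 90) 2 ∧
      PySem.Int.mod n 10 = PySem.Int.mod (n % 90) 10 ∧
      PySem.Int.mod n 3 = PySem.Int.mod (n % 90) 3 ∧
      PySem.Int.mod n 9 = PySem.Int.mod (n % 90) 9 := by
    simp only [PySem.Int.mod_eq_emod_of_pos (show (0:Int) < 2 by norm_num),
        PySem.Int.mod_eq_emod_of_pos (show (0:Int) < 10 by norm_num),
        PySem.Int.mod_eq_emod_of_pos (show (0:Int) < 3 by norm_num),
        PySem.Int.mod_eq_emod_of_pos (show (0:Int) < 9 by norm_num)]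
    omega
  have hFF : pvF n - pvF (n - 1) = pvF (n % 90) - pvF (n % 90 - 1) := by
    unfold pvF
    rw [← pv_sum_map_sub, ← pv_sum_map_sub]
    congr 1
    refine List.map_congr_left ?_
    intro r _
    have := hsplit r
    simpa [sub_sub] using this
  have hInd : pvInd n = pvInd (n % 90) := by
    unfold pvInd
    rw [hmods.1, hmods.2.1, hmods.2.2.1, hmods.2.2.2]
  rw [hFF, hInd]
  have h0 : 0 ≤ n % 90 := Int.emod_nonneg n (by norm_num)
  have h1 : n % 90 < 90 := Int.emod_lt_of_pos n (by norm_num)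
  set m := n % 90 with hm
  clear_value m
  clear hm hsplit hmods hFF hInd
  interval_cases m <;> decide

-- A's fold shifted by an accumulator, as a sum of indicators
theorem pvA_fold (l : List Int) (c : Int) :
    l.foldl
      (fun cnt i =>
        if PySem.Int.mod i 2 = 0 then cnt
        else if PySem.Int.mod i 10 = 5 then cnt
        else if PySem.Int.mod i 3 = 0 ∧ PySem.Int.mod i 9 ≠ 0 then cnt
        else cnt + 1) c = c + (l.map pvInd).sum := by
  induction l generalizing c with
  | nil => simp
  | cons x xs ih =>
    simp only [List.foldl_cons, List.map_cons, List.sum_cons, ih]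
    unfold pvInd
    split_ifs <;> ring

theorem pv_main (n : Nat) : ∀ (a b : Int), b = a + n →
    ((PySem.List.pyRange a (b + 1) 1).map pvInd).sum = pvF b - pvF (a - 1) := by
  induction n with
  | zero =>
    intro a b hb
    have hba : b = a := by omega
    subst hba
    rw [PySem.List.pyRange_one_singleton]
    have := pvF_step b
    simp only [List.map_cons, List.map_nil, List.sum_cons, List.sum_nil, add_zero]
    omega
  | succ k ih =>
    intro a b hb
    have hab : a ≤ b := by omega
    rw [PySem.List.pyRange_one_succ_right hab]
    have hsplit : b = (b - 1) + 1 := by ring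
    have ih' := ih a (b - 1) (by omega)
    have : PySem.List.pyRange a (b - 1 + 1) 1 = PySem.List.pyRange a b 1 := by
      norm_num
    rw [this] at ih'
    rw [List.map_append, List.sum_append, ih']
    have := pvF_step b
    simp at this ⊢
    omega

-- ===== VERDICT (by name: the statement is the Claim_ definition above) =====
theorem is_onjeonsu_spec : Claim_equal_is_onjeonsu := by
  intro a b _
  unfold Spec_is_onjeonsu is_onjeonsu is_onjeonsu_alt
  rw [pvA_fold]
  by_cases h : a > b
  · rw [PySem.List.pyRange_one_eq_nil (show b + 1 ≤ a by omega)]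
    simp [h]
  · push Not at h
    rw [if_neg (by omega)]
    have hn : b = a + ((b - a).toNat : Int) := by omega
    have := pv_main (b - a).toNat a b hn
    rw [zero_add, this]
    unfold pvF
    rw [← pv_sum_map_sub]
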